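-- pv_equiv track=rewrite | github.com/jakubzolkos/wireframe | backend/autopcb/parsers/altium/converters.py | convert_property_to_kicad_string
-- ===== SOURCE A (Python) =====
-- def convert_property_to_kicad_string(a_string: str):
--     """Sanitizes an Altium property"""
--     converted = ""
--     in_overbar = False
--     iterator = iter(range(len(a_string)))
--
--     for i in iterator:
--         char = a_string[i]
--         lookahead = a_string[i + 1] if i + 1 < len(a_string) else None
--
--         if lookahead == '\\':
--             if not in_overbar:
--                 converted += "~{"
--                 in_overbar = True
--
--             converted += char
--             next(iterator)
--         else:
--             if in_overbar:
--                 converted += "}"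
--                 in_overbar = False
--
--             converted += char
--
--     if in_overbar:
--         converted += "}"
--
--     return converted
-- ===== SOURCE B (Python) =====
-- def convert_property_to_kicad_string(a_string: str):
--     """Sanitizes an Altium property"""
--     out = []
--     i = 0
--     n = len(a_string)
--     while i < n:
--         if i + 1 < n and a_string[i + 1] == '\\':
--             run = []
--             while i + 1 < n and a_string[i + 1] == '\\':
--                 run.append(a_string[i])
--                 i += 2
--             out.append('~{' + ''.join(run) + '}')
--         else:
--             out.append(a_string[i])
--             i += 1
--     return ''.join(out)
-- ===== Notes on version B (the rewrite author's own statement) =====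
-- stated objective: alternative
-- what changed: Replaces A's per-character state machine (in_overbar flag, iterator with a skipped step) by direct extraction of maximal overbar runs: an inner loop collects each run of (char, backslash) pairs and emits it as a single tilde-brace group, ordinary characters pass through.
import Mathlib
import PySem

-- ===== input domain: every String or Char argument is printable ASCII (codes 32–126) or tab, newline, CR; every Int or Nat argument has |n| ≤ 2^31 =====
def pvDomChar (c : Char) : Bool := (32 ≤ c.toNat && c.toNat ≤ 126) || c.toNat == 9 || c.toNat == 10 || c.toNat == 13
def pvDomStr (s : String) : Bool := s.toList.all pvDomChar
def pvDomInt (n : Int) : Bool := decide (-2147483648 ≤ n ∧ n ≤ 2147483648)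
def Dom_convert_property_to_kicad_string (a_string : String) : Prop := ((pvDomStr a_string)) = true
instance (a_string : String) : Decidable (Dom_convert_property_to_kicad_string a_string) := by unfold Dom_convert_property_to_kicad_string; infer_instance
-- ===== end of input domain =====

-- B replaces A's per-character in_overbar state machine by direct extraction of
-- maximal overbar runs (inner loop collecting the run, emitted as one group); same cost, alternative structure.

-- ===== PORT A =====
-- A's for-loop over range(len) with a skipped iterator step: index recursion, advancing
-- by 2 when the lookahead is a backslash (then i+2 ≤ length, so indexing never fails).
def goA (l : List Char) (i : Nat) (conv : List Char) (inOver : Bool) : List Char :=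
  if h : i < l.length then
    let char := l[i]
    let lookahead := l[i + 1]?
    if lookahead = some '\\' then
      let conv' := if !inOver then conv ++ ['~', '{'] else conv
      goA l (i + 2) (conv' ++ [char]) true
    else
      let conv' := if inOver then conv ++ ['}'] else conv
      goA l (i + 1) (conv' ++ [char]) false
  else
    if inOver then conv ++ ['}'] else conv
termination_by l.length - i

def convert_property_to_kicad_string (a_string : String) : String :=
  String.ofList (goA a_string.toList 0 [] false)

-- ===== PORT B =====
-- B's inner while loop: collect the overbarred characters of a maximal run of
-- (char, '\') pairs, returning (run, rest of the input).
def takePairs : List Char → List Char × List Char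
  | c :: b :: rest =>
    if b = '\\' then
      let pr := takePairs rest
      (c :: pr.1, pr.2)
    else ([], c :: b :: rest)
  | l => ([], l)

theorem takePairs_snd_length_le : ∀ l : List Char, (takePairs l).2.length ≤ l.length
  | [] => by simp [takePairs]
  | [_] => by simp [takePairs]
  | c :: b :: rest => by
    by_cases hb : b = '\\'
    · have := takePairs_snd_length_le rest
      simp [takePairs, hb]
      omega
    · simp [takePairs, hb]

-- B's outer while loop: either a run starts here (next char is '\') and is emitted
-- as '~{' ++ run ++ '}', or the character passes through unchanged.
def goB : List Char → List Char
  | [] => []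
  | c :: rest =>
    if rest.head? = some '\\' then
      let pr := takePairs rest.tail
      '~' :: '{' :: c :: pr.1 ++ '}' :: goB pr.2
    else
      c :: goB rest
termination_by l => l.length
decreasing_by
  · have h1 := takePairs_snd_length_le rest.tail
    have h2 : rest.tail.length ≤ rest.length := by cases rest <;> simp
    simp; omega
  · simp

def convert_property_to_kicad_string_alt (a_string : String) : String :=
  String.ofList (goB a_string.toList)

-- ===== PRECONDITION & SPEC =====
def Spec_convert_property_to_kicad_string (a_string : String) (out : String) : Prop := out = convert_property_to_kicad_string_alt a_string
instance (a_string : String) (out : String) : Decidable (Spec_convert_property_to_kicad_string a_string out) := by unfold Spec_convert_property_to_kicad_string; infer_instance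

-- ===== CLAIM (what is proved, stated in full; the proofs are below) =====
def Claim_equal_convert_property_to_kicad_string : Prop := ∀ (a_string : String), Dom_convert_property_to_kicad_string a_string → Spec_convert_property_to_kicad_string a_string (convert_property_to_kicad_string a_string)

-- ===== LEMMAS AND PROOFS =====

-- What B produces from the middle of a run (A's in_overbar = true state).
def overCont (l : List Char) : List Char :=
  (takePairs l).1 ++ '}' :: goB (takePairs l).2

theorem goB_nil : goB [] = [] := by simp [goB]

theorem goB_cons_pair (c : Char) (rest : List Char) (h : rest.head? = some '\\') :
    goB (c :: rest) =
      '~' :: '{' :: c :: (takePairs rest.tail).1 ++ '}' :: goB (takePairs rest.tail).2 := by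
  rw [goB, if_pos h]

theorem goB_cons_nopair (c : Char) (rest : List Char) (h : ¬ rest.head? = some '\\') :
    goB (c :: rest) = c :: goB rest := by
  rw [goB, if_neg h]

theorem overCont_nil : overCont [] = ['}'] := by simp [overCont, takePairs, goB_nil]

theorem overCont_pair (c : Char) (rest : List Char) (h : rest.head? = some '\\') :
    overCont (c :: rest) = c :: overCont rest.tail := by
  cases rest with
  | nil => simp at h
  | cons b r =>
    simp at h
    simp [overCont, takePairs, h]

theorem overCont_nopair (c : Char) (rest : List Char) (h : ¬ rest.head? = some '\\') :
    overCont (c :: rest) = '}' :: c :: goB rest := by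
  have ht : takePairs (c :: rest) = ([], c :: rest) := by
    cases rest with
    | nil => simp [takePairs]
    | cons b r =>
      simp at h
      simp [takePairs, h]
  simp [overCont, ht, goB_cons_nopair c rest h]

theorem goA_key : ∀ (n : Nat) (l : List Char) (i : Nat), l.length - i ≤ n →
    ∀ conv : List Char,
      goA l i conv false = conv ++ goB (l.drop i) ∧
      goA l i conv true = conv ++ overCont (l.drop i) := by
  intro n
  induction n with
  | zero =>
    intro l i hle conv
    have hge : l.length ≤ i := by omega
    rw [goA, dif_neg (by omega), goA, dif_neg (by omega)]
    rw [List.drop_of_length_le hge, goB_nil, overCont_nil]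
    simp
  | succ n ih =>
    intro l i hle conv
    by_cases h : i < l.length
    · have hdrop : l.drop i = l[i] :: l.drop (i + 1) := List.drop_eq_getElem_cons h
      have hla : l[i + 1]? = (l.drop (i + 1)).head? := by
        rw [List.head?_drop]
      rw [goA, dif_pos h, goA, dif_pos h]
      by_cases hbs : l[i + 1]? = some '\\'
      · -- a pair: A consumes two characters, stays/enters overbar
        rw [if_pos hbs, if_pos hbs]
        have hdrop2 : (l.drop (i + 1)).tail = l.drop (i + 2) := by
          rw [List.tail_drop]
        have hih := ih l (i + 2) (by omega)
        constructor
        · rw [(hih _).2, hdrop, goB_cons_pair _ _ (by rw [← hla]; exact hbs)]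
          rw [hdrop2]
          simp [overCont]
        · rw [(hih _).2, hdrop, overCont_pair _ _ (by rw [← hla]; exact hbs)]
          rw [hdrop2]
          simp
      · -- no pair: A emits one character, closes the overbar if open
        rw [if_neg hbs, if_neg hbs]
        have hih := ih l (i + 1) (by omega)
        constructor
        · rw [(hih _).1, hdrop, goB_cons_nopair _ _ (by rw [← hla] at *; exact hbs)]
          simp
        · rw [(hih _).1, hdrop, overCont_nopair _ _ (by rw [← hla] at *; exact hbs)]
          simp
    · rw [goA, dif_neg h, goA, dif_neg h]
      rw [List.drop_of_length_le (by omega), goB_nil, overCont_nil]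
      simp

-- ===== VERDICT (by name: the statement is the Claim_ definition above) =====
theorem convert_property_to_kicad_string_spec : Claim_equal_convert_property_to_kicad_string := by
  intro s _
  unfold Spec_convert_property_to_kicad_string convert_property_to_kicad_string
    convert_property_to_kicad_string_alt
  have h := (goA_key s.toList.length s.toList 0 (by omega) []).1
  rw [h]
  simp
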